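-- pv_equiv track=rewrite | github.com/namu1714/Algorithm-Problem-Solving | python/programmers_자동완성.py | solution
-- ===== SOURCE A (Python) =====
-- def compareStr(s, s2):
--     length = (len(s) if len(s) < len(s2) else len(s2))
--
--     ret = length
--     if len(s) > len(s2):
--         ret += 1
--
--     for i in range(length):
--         if s[i] != s2[i]:
--             ret = i+1
--             break
--
--     return ret
--
-- def solution(words):
--     answer = 0
--
--     words.sort()
--
--     for i in range(0, len(words)):
--         max = 0
--         if i > 0:
--             tmp = compareStr(words[i], words[i-1])
--             if tmp > max: max = tmp
--         if i < len(words) - 1: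
--             tmp = compareStr(words[i], words[i+1])
--             if tmp > max: max = tmp
--
--         answer += max
--
--     return answer
-- ===== SOURCE B (Python) =====
-- def solution(words):
--     # Count every prefix (including the empty prefix) of every word once.
--     cnt = {}
--     for w in words:
--         for d in range(len(w) + 1):
--             p = w[:d]
--             cnt[p] = cnt.get(p, 0) + 1
--     # A word is typed until its current prefix is unique among all words.
--     answer = 0
--     for w in words:
--         typed = len(w)
--         for d in range(len(w) + 1):
--             if cnt[w[:d]] == 1:
--                 typed = d
--                 break
--         answer += typed
--     return answer
-- ===== Notes on version B (the rewrite author's own statement) =====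
-- stated objective: alternative
-- what changed: Replaces sort-then-compare-with-both-neighbours by a prefix counter (hash map of every prefix of every word): each word's keystroke count is the first depth at which its prefix occurs only once; no sorting, no pairwise string comparison.
import Mathlib
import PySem

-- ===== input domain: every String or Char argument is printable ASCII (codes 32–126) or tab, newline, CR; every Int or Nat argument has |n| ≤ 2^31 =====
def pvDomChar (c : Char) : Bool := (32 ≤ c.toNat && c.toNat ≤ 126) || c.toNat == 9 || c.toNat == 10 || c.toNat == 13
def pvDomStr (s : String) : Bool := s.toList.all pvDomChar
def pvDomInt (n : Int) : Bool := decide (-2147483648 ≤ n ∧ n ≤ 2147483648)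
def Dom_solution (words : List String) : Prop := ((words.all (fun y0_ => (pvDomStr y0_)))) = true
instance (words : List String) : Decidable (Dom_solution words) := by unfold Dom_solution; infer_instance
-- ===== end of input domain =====

-- B replaces sort-and-compare-with-neighbours by a prefix counter (first depth whose prefix is unique);
-- A sorts its argument in place (words.sort()) and B does not: the equivalence proved is about the return value only.

-- ===== PORT A =====
-- for i in range(length): if s[i] != s2[i]: ret = i+1; break
def compareLoop (s s2 : List Char) (ret : Int) : List Int → Int
  | [] => ret
  | i :: rest =>
    if PySem.List.pyGet? s i ≠ PySem.List.pyGet? s2 i then i + 1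
    else compareLoop s s2 ret rest

def compareStr (s s2 : String) : Int :=
  let length : Int := if PySem.Str.len s < PySem.Str.len s2 then PySem.Str.len s else PySem.Str.len s2
  let ret : Int := if PySem.Str.len s > PySem.Str.len s2 then length + 1 else length
  compareLoop s.toList s2.toList ret (PySem.List.pyRange 0 length)

def solution (words : List String) : Int :=
  let ws := PySem.List.sorted words (fun x => x)
  (PySem.List.pyRange 0 ((ws.length : Int))).foldl (fun answer i =>
    let m0 : Int := 0
    let m1 : Int :=
      if 0 < i then
        let tmp := compareStr (PySem.List.pyGetD ws i "") (PySem.List.pyGetD ws (i - 1) "")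
        if tmp > m0 then tmp else m0
      else m0
    let m2 : Int :=
      if i < (ws.length : Int) - 1 then
        let tmp := compareStr (PySem.List.pyGetD ws i "") (PySem.List.pyGetD ws (i + 1) "")
        if tmp > m1 then tmp else m1
      else m1
    answer + m2) 0

-- ===== PORT B =====
-- for d in range(len(w)+1): if cnt[w[:d]] == 1: typed = d; break   (typed starts as len(w))
def findTyped (cnt : PySem.Dict (List Char) Int) (w : List Char) : List Int → Int
  | [] => (w.length : Int)
  | d :: rest =>
    if cnt.getD (PySem.List.slice w none (some d)) 0 == 1 then d
    else findTyped cnt w rest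

def solution_alt (words : List String) : Int :=
  let cnt : PySem.Dict (List Char) Int :=
    words.foldl (fun cnt w =>
      (PySem.List.pyRange 0 (PySem.Str.len w + 1)).foldl (fun cnt d =>
        let p := PySem.List.slice w.toList none (some d)
        cnt.insert p (cnt.getD p 0 + 1)) cnt) PySem.Dict.empty
  words.foldl (fun answer w =>
    answer + findTyped cnt w.toList (PySem.List.pyRange 0 (PySem.Str.len w + 1))) 0

-- ===== PRECONDITION & SPEC =====
def Spec_solution (words : List String) (out : Int) : Prop := out = solution_alt words
instance (words : List String) (out : Int) : Decidable (Spec_solution words out) := by unfold Spec_solution; infer_instance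

-- ===== CLAIM (what is proved, stated in full; the proofs are below) =====
def Claim_equal_solution : Prop := ∀ (words : List String), Dom_solution words → Spec_solution words (solution words)

-- ===== LEMMAS AND PROOFS =====

-- longest common prefix length
def lcp : List Char → List Char → Nat
  | a :: s, b :: t => if a = b then lcp s t + 1 else 0
  | _, _ => 0

lemma lcp_le_left (s t : List Char) : lcp s t ≤ s.length := by
  induction s generalizing t with
  | nil => cases t <;> simp [lcp]
  | cons a s ih =>
    cases t with
    | nil => simp [lcp]
    | cons b t =>
      by_cases h : a = b <;> simp [lcp, h]
      exact ih t

lemma lcp_le_right (s t : List Char) : lcp s t ≤ t.length := by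
  induction s generalizing t with
  | nil => cases t <;> simp [lcp]
  | cons a s ih =>
    cases t with
    | nil => simp [lcp]
    | cons b t =>
      by_cases h : a = b <;> simp [lcp, h]
      exact ih t

lemma lcp_comm (s t : List Char) : lcp s t = lcp t s := by
  induction s generalizing t with
  | nil => cases t <;> simp [lcp]
  | cons a s ih =>
    cases t with
    | nil => simp [lcp]
    | cons b t =>
      by_cases h : a = b
      · simp [lcp, h, ih]
      · simp [lcp, h, Ne.symm h]

lemma lcp_self (s : List Char) : lcp s s = s.length := by
  induction s with
  | nil => simp [lcp]
  | cons a s ih => simp [lcp, ih]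

lemma le_lcp_iff (s t : List Char) (d : Nat) :
    d ≤ lcp s t ↔ d ≤ s.length ∧ d ≤ t.length ∧ s.take d = t.take d := by
  induction s generalizing t d with
  | nil => cases t <;> cases d <;> simp [lcp]
  | cons a s ih =>
    cases t with
    | nil => cases d <;> simp [lcp]
    | cons b t =>
      cases d with
      | zero => simp
      | succ d =>
        by_cases h : a = b
        · subst h
          simp [lcp, ih]
        · simp only [lcp, if_neg h]
          constructor
          · intro h'; omega
          · rintro ⟨-, -, htake⟩
            simp only [List.take_succ_cons, List.cons.injEq] at htake
            exact absurd htake.1 h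

lemma lcp_agree (s t : List Char) (j : Nat) (h : j < lcp s t) : s[j]? = t[j]? := by
  induction s generalizing t j with
  | nil => cases t <;> simp [lcp] at h
  | cons a s ih =>
    cases t with
    | nil => simp [lcp] at h
    | cons b t =>
      by_cases hab : a = b
      · subst hab
        cases j with
        | zero => simp
        | succ j =>
          simp [lcp] at h
          simpa using ih t j (by omega)
      · simp [lcp, hab] at h

lemma lcp_mismatch (s t : List Char) (h1 : lcp s t < s.length) (h2 : lcp s t < t.length) :
    s[lcp s t]? ≠ t[lcp s t]? := by
  induction s generalizing t with
  | nil => simp at h1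
  | cons a s ih =>
    cases t with
    | nil => simp at h2
    | cons b t =>
      by_cases hab : a = b
      · subst hab
        have hxx : lcp (a :: s) (a :: t) = lcp s t + 1 := by simp [lcp]
        rw [hxx] at h1 h2 ⊢
        simp only [List.length_cons] at h1 h2
        simpa using ih t (by omega) (by omega)
      · simp [lcp, hab]

-- strings between two strings share their common prefix
lemma lcp_between (a b c : List Char)
    (h1 : List.Lex (· < ·) a b) (h2 : List.Lex (· < ·) b c) :
    lcp a c ≤ lcp a b ∧ lcp a c ≤ lcp b c := by
  induction a generalizing b c with
  | nil => cases c <;> simp [lcp]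
  | cons x a ih =>
    cases c with
    | nil => cases h2
    | cons z c =>
      by_cases hxz : x = z
      · subst hxz
        have hxx : ∀ u v : List Char, lcp (x :: u) (x :: v) = lcp u v + 1 := by
          intro u v; simp [lcp]
        cases h1 with
        | cons h1' =>
          cases h2 with
          | cons h2' =>
            have := ih _ _ h1' h2'
            rw [hxx, hxx, hxx]
            omega
          | rel hlt2 => exact absurd hlt2 (lt_irrefl x)
        | rel hlt =>
          cases h2 with
          | cons h2' => exact absurd hlt (lt_irrefl x)
          | rel hlt2 => exact absurd (lt_trans hlt hlt2) (lt_irrefl x)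
      · simp [lcp, hxz]

lemma lcp_between_str (a b c : String) (h1 : a ≤ b) (h2 : b ≤ c) :
    lcp a.toList c.toList ≤ lcp a.toList b.toList ∧
      lcp a.toList c.toList ≤ lcp b.toList c.toList := by
  rcases eq_or_lt_of_le h1 with rfl | hlt1
  · exact ⟨by rw [lcp_self]; exact lcp_le_left _ _, le_refl _⟩
  rcases eq_or_lt_of_le h2 with rfl | hlt2
  · exact ⟨le_refl _, by rw [lcp_self]; exact lcp_le_right _ _⟩
  have hl1 : List.Lex (· < ·) a.toList b.toList := by
    rw [← List.lt_iff_lex_lt]; exact String.lt_iff_toList_lt.mp hlt1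
  have hl2 : List.Lex (· < ·) b.toList c.toList := by
    rw [← List.lt_iff_lex_lt]; exact String.lt_iff_toList_lt.mp hlt2
  exact lcp_between _ _ _ hl1 hl2

lemma compareLoop_range (s t : List Char) (ret : Int) (L : Nat)
    (hL : L ≤ s.length) (hL' : L ≤ t.length) :
    ∀ n k : Nat, L - k = n → k ≤ lcp s t →
      compareLoop s t ret (PySem.List.pyRange (k : Int) (L : Int)) =
        if lcp s t < L then ((lcp s t : Int) + 1) else ret := by
  intro n
  induction n with
  | zero =>
    intro k hn hk
    rw [PySem.List.pyRange_one_eq_nil (by omega)]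
    rw [if_neg (by omega)]
    rfl
  | succ n ih =>
    intro k hn hk
    rw [PySem.List.pyRange_one_cons (by omega)]
    show (if PySem.List.pyGet? s (k : Int) ≠ PySem.List.pyGet? t (k : Int) then (k : Int) + 1
      else compareLoop s t ret (PySem.List.pyRange ((k : Int) + 1) (L : Int))) = _
    rw [PySem.List.pyGet?_natCast, PySem.List.pyGet?_natCast]
    rcases Nat.lt_or_ge k (lcp s t) with hlt | hge
    · rw [if_neg (by simpa using lcp_agree s t k hlt)]
      have : ((k : Int) + 1) = ((k + 1 : Nat) : Int) := by push_cast; ring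
      rw [this, ih (k + 1) (by omega) (by omega)]
    · have hk' : k = lcp s t := by omega
      subst hk'
      rw [if_pos (lcp_mismatch s t (by omega) (by omega))]
      rw [if_pos (by omega)]

lemma compareStr_eq (s t : String) :
    compareStr s t = ((min s.toList.length (lcp s.toList t.toList + 1) : Nat) : Int) := by
  have hs : PySem.Str.len s = (s.toList.length : Int) := by simp [pysem]
  have ht : PySem.Str.len t = (t.toList.length : Int) := by simp [pysem]
  have h1 := lcp_le_left s.toList t.toList
  have h2 := lcp_le_right s.toList t.toList
  set a := s.toList.length with ha
  set b := t.toList.length with hb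
  have hL : (if PySem.Str.len s < PySem.Str.len t then PySem.Str.len s else PySem.Str.len t)
      = ((min a b : Nat) : Int) := by
    rw [hs, ht]; split_ifs <;> push_cast <;> omega
  show compareLoop s.toList t.toList
      (if PySem.Str.len s > PySem.Str.len t
        then (if PySem.Str.len s < PySem.Str.len t then PySem.Str.len s else PySem.Str.len t) + 1
        else (if PySem.Str.len s < PySem.Str.len t then PySem.Str.len s else PySem.Str.len t))
      (PySem.List.pyRange 0
        (if PySem.Str.len s < PySem.Str.len t then PySem.Str.len s else PySem.Str.len t)) = _
  rw [hL, hs, ht]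
  rw [show (0 : Int) = ((0 : Nat) : Int) from rfl]
  rw [compareLoop_range s.toList t.toList _ (min a b) (by omega) (by omega)
    (min a b - 0) 0 rfl (by omega)]
  split_ifs <;> (push_cast at *; omega)

-- the per-word keystroke value both programs compute:
-- 0 if the word is alone, else min (1 + max lcp with the other words) (its length)
def maxl (w : String) (l : List String) : Nat :=
  (l.map (fun u => lcp w.toList u.toList)).foldr max 0

def val (w : String) (ws : List String) : Int :=
  if ws.erase w = [] then 0
  else ((min (maxl w (ws.erase w) + 1) w.toList.length : Nat) : Int)

lemma foldr_max_le (l : List Nat) (m : Nat) : l.foldr max 0 ≤ m ↔ ∀ x ∈ l, x ≤ m := by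
  induction l with
  | nil => simp
  | cons a l ih => simp [ih]

lemma foldr_max_mem (l : List Nat) : l.foldr max 0 = 0 ∨ l.foldr max 0 ∈ l := by
  induction l with
  | nil => simp
  | cons a l ih =>
    rcases Nat.le_total a (l.foldr max 0) with h | h
    · rcases ih with h0 | hm
      · left; simp [List.foldr_cons, h0] at h ⊢; omega
      · right; simp [Nat.max_eq_right h, hm]
    · right; simp [Nat.max_eq_left h]

lemma foldr_max_perm (l l' : List Nat) (h : l.Perm l') : l.foldr max 0 = l'.foldr max 0 := by
  apply Nat.le_antisymm
  · rw [foldr_max_le]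
    intro x hx
    exact (foldr_max_le l' _).mp (le_refl _) x (h.mem_iff.mp hx)
  · rw [foldr_max_le]
    intro x hx
    exact (foldr_max_le l _).mp (le_refl _) x (h.mem_iff.mpr hx)

lemma maxl_perm (w : String) (l l' : List String) (h : l.Perm l') : maxl w l = maxl w l' := by
  exact foldr_max_perm _ _ (h.map _)

lemma val_perm (w : String) (l l' : List String) (h : l.Perm l') : val w l = val w l' := by
  have he : (l.erase w).Perm (l'.erase w) := h.erase w
  unfold val
  rw [maxl_perm w _ _ he]
  by_cases h0 : l.erase w = []
  · have h0' : l'.erase w = [] := by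
      have hlen := he.length_eq
      rw [h0] at hlen
      exact List.length_eq_zero_iff.mp hlen.symm
    rw [if_pos h0, if_pos h0']
  · have h0' : l'.erase w ≠ [] := by
      intro hc
      apply h0
      have hlen := he.length_eq
      rw [hc] at hlen
      exact List.length_eq_zero_iff.mp hlen
    rw [if_neg h0, if_neg h0']

-- ===== A side =====

def aval (ws : List String) (i : Int) : Int :=
  let m0 : Int := 0
  let m1 : Int :=
    if 0 < i then
      let tmp := compareStr (PySem.List.pyGetD ws i "") (PySem.List.pyGetD ws (i - 1) "")
      if tmp > m0 then tmp else m0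
    else m0
  let m2 : Int :=
    if i < (ws.length : Int) - 1 then
      let tmp := compareStr (PySem.List.pyGetD ws i "") (PySem.List.pyGetD ws (i + 1) "")
      if tmp > m1 then tmp else m1
    else m1
  m2

lemma if_gt_eq_max (a b : Int) : (if a > b then a else b) = max b a := by
  split_ifs <;> omega

lemma perm_cons_eraseIdx (ws : List String) (i : Nat) (hi : i < ws.length) :
    ws.Perm (ws[i] :: ws.eraseIdx i) := by
  conv_lhs => rw [← List.take_append_drop i ws, List.drop_eq_getElem_cons hi]
  rw [List.eraseIdx_eq_take_drop_succ]
  exact List.perm_middle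

lemma eraseIdx_perm (ws : List String) (i : Nat) (hi : i < ws.length) :
    (ws.eraseIdx i).Perm (ws.erase ws[i]) := by
  have h1 := perm_cons_eraseIdx ws i hi
  have h2 : ws.Perm (ws[i] :: ws.erase ws[i]) :=
    List.perm_cons_erase (ws.getElem_mem hi)
  exact (h1.symm.trans h2).cons_inv

lemma mem_eraseIdx_index (ws : List String) (i : Nat) (hi : i < ws.length) (u : String)
    (hu : u ∈ ws.eraseIdx i) : ∃ j, ∃ (hj : j < ws.length), j ≠ i ∧ ws[j] = u := by
  rw [List.eraseIdx_eq_take_drop_succ, List.mem_append] at hu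
  rcases hu with hu | hu
  · rw [List.mem_iff_getElem] at hu
    obtain ⟨j, hj, hju⟩ := hu
    have hjlen : j < i := by
      have := hj; simp [List.length_take] at this; omega
    refine ⟨j, by omega, by omega, ?_⟩
    rw [← hju, List.getElem_take]
  · rw [List.mem_iff_getElem] at hu
    obtain ⟨j, hj, hju⟩ := hu
    have hjlen : i + 1 + j < ws.length := by
      have := hj; simp [List.length_drop] at this; omega
    refine ⟨i + 1 + j, hjlen, by omega, ?_⟩
    rw [← hju, List.getElem_drop]

lemma neighbor_mem_eraseIdx_left (ws : List String) (i : Nat) (hi : i < ws.length)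
    (h0 : 0 < i) : ws[i - 1] ∈ ws.eraseIdx i := by
  rw [List.eraseIdx_eq_take_drop_succ, List.mem_append]
  left
  rw [List.mem_iff_getElem]
  exact ⟨i - 1, by simp [List.length_take]; omega, List.getElem_take⟩

lemma neighbor_mem_eraseIdx_right (ws : List String) (i : Nat) (hi : i + 1 < ws.length) :
    ws[i + 1] ∈ ws.eraseIdx i := by
  rw [List.eraseIdx_eq_take_drop_succ, List.mem_append]
  right
  rw [List.mem_iff_getElem]
  refine ⟨0, by simp [List.length_drop]; omega, ?_⟩
  rw [List.getElem_drop]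

lemma pairwise_le_getElem (ws : List String) (hp : ws.Pairwise (· ≤ ·)) (p q : Nat)
    (hpq : p ≤ q) (hq : q < ws.length) : ws[p] ≤ ws[q] := by
  rcases Nat.lt_or_ge p q with h | h
  · exact (List.pairwise_iff_getElem.mp hp) p q (by omega) hq h
  · have : p = q := by omega
    subst this; exact le_refl _

lemma aval_closed (ws : List String) (i : Int) :
    aval ws i =
      (if i < (ws.length : Int) - 1 then
        max (if 0 < i then
              max 0 (compareStr (PySem.List.pyGetD ws i "") (PySem.List.pyGetD ws (i - 1) ""))
            else 0)
          (compareStr (PySem.List.pyGetD ws i "") (PySem.List.pyGetD ws (i + 1) ""))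
      else (if 0 < i then
              max 0 (compareStr (PySem.List.pyGetD ws i "") (PySem.List.pyGetD ws (i - 1) ""))
            else 0)) := by
  unfold aval
  simp only [if_gt_eq_max]

lemma aval_eq (ws : List String) (hp : ws.Pairwise (· ≤ ·)) (i : Nat) (hi : i < ws.length) :
    aval ws (i : Int) = val ws[i] ws := by
  have hget : PySem.List.pyGetD ws (i : Int) "" = ws[i] := by
    rw [PySem.List.pyGetD_eq_getElem ws "" (by omega) (by exact_mod_cast hi)]
    simp
  rcases Nat.lt_or_ge 1 ws.length with hn | hn
  swap
  · -- ws.length ≤ 1, so i = 0 and ws = [ws[0]]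
    have hi0 : i = 0 := by omega
    subst hi0
    have hlen : ws.length = 1 := by omega
    rw [aval_closed]
    rw [if_neg (by push_cast; omega), if_neg (by omega)]
    have hnil : ws.erase ws[0] = [] := by
      have := List.length_erase_of_mem (ws.getElem_mem hi)
      rw [hlen] at this
      exact List.length_eq_zero_iff.mp this
    rw [val, if_pos hnil]
  · -- at least two words
    have hmem : ws[i] ∈ ws := ws.getElem_mem hi
    have hne : ws.erase ws[i] ≠ [] := by
      intro hc
      have := List.length_erase_of_mem hmem
      rw [hc] at this
      simp at this
      omega
    have hperm : (ws.erase ws[i]).Perm (ws.eraseIdx i) := (eraseIdx_perm ws i hi).symm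
    have hmaxl : maxl ws[i] (ws.erase ws[i]) =
        ((ws.eraseIdx i).map (fun u => lcp ws[i].toList u.toList)).foldr max 0 :=
      foldr_max_perm _ _ (hperm.map _)
    -- bound every element of eraseIdx by the neighbours
    have hgd : ∀ (j : Nat) (hj : j < ws.length), ws.getD j "" = ws[j] :=
      fun j hj => List.getD_eq_getElem ws "" hj
    have hbound : ∀ u ∈ ws.eraseIdx i, lcp ws[i].toList u.toList ≤
        max (if 0 < i then lcp ws[i].toList (ws.getD (i - 1) "").toList else 0)
            (if i + 1 < ws.length then lcp ws[i].toList (ws.getD (i + 1) "").toList else 0) := by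
      intro u hu
      obtain ⟨j, hj, hji, rfl⟩ := mem_eraseIdx_index ws i hi u hu
      rcases Nat.lt_or_ge j i with hlt | hge
      · have h0i : 0 < i := by omega
        have hle1 : ws[j] ≤ ws[i - 1] := pairwise_le_getElem ws hp j (i - 1) (by omega) (by omega)
        have hle2 : ws[i - 1] ≤ ws[i] := pairwise_le_getElem ws hp (i - 1) i (by omega) hi
        have hb := (lcp_between_str ws[j] ws[i - 1] ws[i] hle1 hle2).2
        have hb2 : lcp ws[i].toList ws[j].toList ≤ lcp ws[i].toList ws[i - 1].toList := by
          rw [lcp_comm ws[i].toList ws[j].toList, lcp_comm ws[i].toList ws[i - 1].toList]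
          exact hb
        rw [if_pos h0i, hgd (i - 1) (by omega)]
        exact le_trans hb2 (le_max_left _ _)
      · have h1n : i + 1 ≤ j := by omega
        have hjn : i + 1 < ws.length := by omega
        have hle1 : ws[i] ≤ ws[i + 1] := pairwise_le_getElem ws hp i (i + 1) (by omega) hjn
        have hle2 : ws[i + 1] ≤ ws[j] := pairwise_le_getElem ws hp (i + 1) j h1n hj
        have hb := (lcp_between_str ws[i] ws[i + 1] ws[j] hle1 hle2).1
        rw [if_pos hjn, hgd (i + 1) hjn]
        exact le_trans hb (le_max_right _ _)
    have hub : maxl ws[i] (ws.erase ws[i]) ≤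
        max (if 0 < i then lcp ws[i].toList (ws.getD (i - 1) "").toList else 0)
            (if i + 1 < ws.length then lcp ws[i].toList (ws.getD (i + 1) "").toList else 0) := by
      rw [hmaxl, foldr_max_le]
      intro x hx
      rw [List.mem_map] at hx
      obtain ⟨u, hu, rfl⟩ := hx
      exact hbound u hu
    have hlb : ∀ u ∈ ws.eraseIdx i,
        lcp ws[i].toList u.toList ≤ maxl ws[i] (ws.erase ws[i]) := by
      intro u hu
      rw [hmaxl]
      exact (foldr_max_le _ _).mp (le_refl _) _ (List.mem_map_of_mem hu)
    rw [aval_closed, val, if_neg hne]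
    set M := maxl ws[i] (ws.erase ws[i]) with hM
    rcases Nat.lt_or_ge (i + 1) ws.length with hnext | hlast
    · -- there is a right neighbour
      have hgetr : PySem.List.pyGetD ws ((i : Int) + 1) "" = ws.getD (i + 1) "" := by
        rw [show ((i : Int) + 1) = ((i + 1 : Nat) : Int) by push_cast; ring]
        rw [PySem.List.pyGetD_eq_getElem ws "" (by omega) (by exact_mod_cast hnext)]
        rw [hgd (i + 1) hnext]
        simp
      rw [if_pos (by omega), hget, hgetr]
      rcases Nat.eq_zero_or_pos i with hi0 | hipos
      · -- first word: only the right neighbour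
        subst hi0
        rw [if_neg (by omega)]
        have hMeq : M = lcp ws[0].toList (ws.getD 1 "").toList := by
          apply Nat.le_antisymm
          · have h := hub
            rw [if_neg (by omega), if_pos (by omega)] at h
            simpa using h
          · have := hlb (ws.getD 1 "") (by
              rw [hgd 1 (by omega)]
              exact neighbor_mem_eraseIdx_right ws 0 (by omega))
            simpa using this
        rw [hMeq]
        simp only [compareStr_eq]
        push_cast
        omega
      · -- middle word
        have hgetl : PySem.List.pyGetD ws ((i : Int) - 1) "" = ws.getD (i - 1) "" := by
          rw [show ((i : Int) - 1) = ((i - 1 : Nat) : Int) by omega]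
          rw [PySem.List.pyGetD_eq_getElem ws "" (by omega) (by omega)]
          rw [hgd (i - 1) (by omega)]
          simp
        rw [if_pos (by exact_mod_cast hipos), hgetl]
        have hMeq : M = max (lcp ws[i].toList (ws.getD (i - 1) "").toList)
            (lcp ws[i].toList (ws.getD (i + 1) "").toList) := by
          apply Nat.le_antisymm
          · have h := hub
            rw [if_pos hipos, if_pos hnext] at h
            exact h
          · apply Nat.max_le.mpr
            constructor
            · have := hlb (ws.getD (i - 1) "") (by
                rw [hgd (i - 1) (by omega)]
                exact neighbor_mem_eraseIdx_left ws i hi hipos)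
              exact this
            · have := hlb (ws.getD (i + 1) "") (by
                rw [hgd (i + 1) hnext]
                exact neighbor_mem_eraseIdx_right ws i hnext)
              exact this
        rw [hMeq]
        simp only [compareStr_eq]
        push_cast
        omega
    · -- last word: only the left neighbour
      have hipos : 0 < i := by omega
      have hgetl : PySem.List.pyGetD ws ((i : Int) - 1) "" = ws.getD (i - 1) "" := by
        rw [show ((i : Int) - 1) = ((i - 1 : Nat) : Int) by omega]
        rw [PySem.List.pyGetD_eq_getElem ws "" (by omega) (by omega)]
        rw [hgd (i - 1) (by omega)]
        simp
      rw [if_neg (by omega), if_pos (by exact_mod_cast hipos), hget, hgetl]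
      have hMeq : M = lcp ws[i].toList (ws.getD (i - 1) "").toList := by
        apply Nat.le_antisymm
        · have h := hub
          rw [if_pos hipos, if_neg (by omega)] at h
          simpa using h
        · exact hlb (ws.getD (i - 1) "") (by
            rw [hgd (i - 1) (by omega)]
            exact neighbor_mem_eraseIdx_left ws i hi hipos)
      rw [hMeq]
      simp only [compareStr_eq]
      push_cast
      omega

lemma solution_eq_sum (words : List String) :
    solution words =
      ((PySem.List.sorted words (fun x => x)).map
        (fun w => val w (PySem.List.sorted words (fun x => x)))).sum := by
  unfold solution
  show (PySem.List.pyRange 0 (((PySem.List.sorted words (fun x => x)).length : Int))).foldl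
      (fun answer i => answer + aval (PySem.List.sorted words (fun x => x)) i) 0 = _
  set ws := PySem.List.sorted words (fun x => x) with hws
  rw [PySem.List.foldl_add]
  have hp : ws.Pairwise (· ≤ ·) := PySem.List.sorted_pairwise words (fun x => x)
  have hcg : ∀ i ∈ PySem.List.pyRange 0 ((ws.length : Int)),
      aval ws i = val (PySem.List.pyGetD ws i "") ws := by
    intro i hi
    rw [PySem.List.mem_pyRange_one] at hi
    obtain ⟨j, rfl⟩ : ∃ j : Nat, i = (j : Int) := ⟨i.toNat, (Int.toNat_of_nonneg hi.1).symm⟩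
    have hj : j < ws.length := by exact_mod_cast hi.2
    rw [show PySem.List.pyGetD ws (j : Int) "" = ws[j] by
      rw [PySem.List.pyGetD_eq_getElem ws "" (by omega) (by exact_mod_cast hj)]; simp]
    exact aval_eq ws hp j hj
  rw [List.map_congr_left hcg]
  rw [show (fun i => val (PySem.List.pyGetD ws i "") ws) =
    ((fun w => val w ws) ∘ (fun i => PySem.List.pyGetD ws i "")) from rfl]
  rw [← List.map_map, PySem.List.map_pyGetD_pyRange_zero']
  simp

-- ===== B side =====

def prefs (l : List Char) : List (List Char) := (List.range (l.length + 1)).map (fun k => l.take k)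

def cntStep (cnt : PySem.Dict (List Char) Int) (w : String) : PySem.Dict (List Char) Int :=
  (PySem.List.pyRange 0 (PySem.Str.len w + 1)).foldl (fun cnt d =>
    let p := PySem.List.slice w.toList none (some d)
    cnt.insert p (cnt.getD p 0 + 1)) cnt

lemma strlen_cast (w : String) : PySem.Str.len w + 1 = ((w.toList.length + 1 : Nat) : Int) := by
  have h : PySem.Str.len w = (w.toList.length : Int) := by simp [pysem]
  rw [h]; push_cast; ring

lemma cntStep_getD (cnt : PySem.Dict (List Char) Int) (w : String) (p : List Char) :
    (cntStep cnt w).getD p 0 = cnt.getD p 0 + ((prefs w.toList).count p : Int) := by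
  unfold cntStep
  rw [strlen_cast, PySem.List.pyRange_zero_nat]
  rw [List.foldl_map]
  have hfold :
      (List.range (w.toList.length + 1)).foldl
        (fun cnt (k : Nat) =>
          let p := PySem.List.slice w.toList none (some (k : Int))
          cnt.insert p (cnt.getD p 0 + 1)) cnt
      = (prefs w.toList).foldl (fun cnt q => cnt.insert q (cnt.getD q 0 + 1)) cnt := by
    unfold prefs
    rw [List.foldl_map]
    apply PySem.List.foldl_congr_mem
    intro acc k _
    rw [PySem.List.slice_to w.toList (Int.natCast_nonneg k)]
    simp
  rw [hfold]
  exact PySem.Dict.getD_foldl_insert_add_one _ _ _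

lemma cnt_getD_aux (ws : List String) (d : PySem.Dict (List Char) Int) (p : List Char) :
    (ws.foldl cntStep d).getD p 0 =
      d.getD p 0 + ((ws.map (fun u => ((prefs u.toList).count p : Int))).sum) := by
  induction ws generalizing d with
  | nil => simp
  | cons w rest ih =>
    rw [List.foldl_cons, ih, cntStep_getD]
    simp [add_assoc]

lemma cnt_getD (words : List String) (p : List Char) :
    (words.foldl cntStep PySem.Dict.empty).getD p 0 =
      ((words.map (fun u => ((prefs u.toList).count p : Int))).sum) := by
  rw [cnt_getD_aux, PySem.Dict.getD_empty, zero_add]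

lemma count_prefs (l p : List Char) :
    (prefs l).count p = if p.length ≤ l.length ∧ l.take p.length = p then 1 else 0 := by
  unfold prefs
  rw [List.count_eq_countP, List.countP_map]
  by_cases hc : p.length ≤ l.length ∧ l.take p.length = p
  · rw [if_pos hc]
    rw [List.countP_congr (q := fun k => k == p.length) ?_]
    · rw [← List.count_eq_countP, List.count_range, if_pos (by omega)]
    · intro k hk
      simp only [List.mem_range] at hk
      simp only [Function.comp_apply, beq_iff_eq]
      constructor
      · intro heq
        have hlenk := congrArg List.length heq
        simp only [List.length_take] at hlenk
        omega
      · intro hkp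
        rw [hkp]
        exact hc.2
  · rw [if_neg hc]
    rw [List.countP_eq_zero.mpr ?_]
    intro k hk
    simp only [List.mem_range] at hk
    simp only [Function.comp_apply, beq_iff_eq]
    intro heq
    apply hc
    have hlenk := congrArg List.length heq
    simp only [List.length_take] at hlenk
    have hkp : k = p.length := by omega
    exact ⟨by omega, by rw [← hkp]; exact heq⟩

lemma findTyped_range (cnt : PySem.Dict (List Char) Int) (w : List Char) (t0 : Nat)
    (hpred : ∀ j : Nat, j ≤ w.length →
      ((cnt.getD (PySem.List.slice w none (some (j : Int))) 0 == 1) = true ↔ t0 ≤ j)) :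
    ∀ n k : Nat, (w.length + 1) - k = n →
      findTyped cnt w (PySem.List.pyRange (k : Int) ((w.length + 1 : Nat) : Int)) =
        if max k t0 ≤ w.length then ((max k t0 : Nat) : Int) else (w.length : Int) := by
  intro n
  induction n with
  | zero =>
    intro k hn
    rw [PySem.List.pyRange_one_eq_nil (by push_cast; omega)]
    show (w.length : Int) = _
    rw [if_neg (by omega)]
  | succ n ih =>
    intro k hn
    rw [PySem.List.pyRange_one_cons (by push_cast; omega)]
    show (if cnt.getD (PySem.List.slice w none (some (k : Int))) 0 == 1 then ((k : Nat) : Int)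
      else findTyped cnt w (PySem.List.pyRange ((k : Int) + 1) ((w.length + 1 : Nat) : Int))) = _
    by_cases hp : t0 ≤ k
    · rw [if_pos ((hpred k (by omega)).mpr hp)]
      rw [if_pos (by omega)]
      congr 1
      omega
    · rw [if_neg (by
        intro hcond
        exact hp ((hpred k (by omega)).mp hcond))]
      rw [show ((k : Int) + 1) = ((k + 1 : Nat) : Int) by push_cast; ring]
      rw [ih (k + 1) (by omega)]
      have hmax : max (k + 1) t0 = max k t0 := by omega
      rw [hmax]

lemma findTyped_eq_val (words : List String) (w : String) (hw : w ∈ words) :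
    findTyped (words.foldl cntStep PySem.Dict.empty) w.toList
        (PySem.List.pyRange 0 (PySem.Str.len w + 1)) = val w words := by
  set cnt := words.foldl cntStep PySem.Dict.empty with hcnt
  set others := words.erase w with hothers
  set M := maxl w others with hM
  set t0 : Nat := if others = [] then 0 else M + 1 with ht0
  -- the counter at depth j counts the words sharing the j-prefix of w
  have hcount : ∀ j : Nat, j ≤ w.toList.length →
      cnt.getD (w.toList.take j) 0 =
        ((words.countP (fun u => decide (j ≤ lcp w.toList u.toList)) : Nat) : Int) := by
    intro j hj
    rw [hcnt, cnt_getD]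
    have hmc : ∀ u ∈ words,
        (((prefs u.toList).count (w.toList.take j) : Nat) : Int) =
          (if decide (j ≤ lcp w.toList u.toList) = true then (1 : Int) else 0) := by
      intro u _
      rw [count_prefs]
      have hlt : (w.toList.take j).length = j := by
        rw [List.length_take]; omega
      by_cases hcase : j ≤ lcp w.toList u.toList
      · have h3 := (le_lcp_iff w.toList u.toList j).mp hcase
        rw [if_pos (by rw [hlt]; exact ⟨h3.2.1, h3.2.2.symm⟩), if_pos (by simpa using hcase)]
        norm_num
      · rw [if_neg (by
          rw [hlt]
          rintro ⟨hul, hut⟩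
          exact hcase ((le_lcp_iff w.toList u.toList j).mpr ⟨hj, hul, hut.symm⟩)),
          if_neg (by simpa using hcase)]
        norm_num
    rw [List.map_congr_left hmc]
    exact PySem.List.sum_map_ite_one_zero _ words
  -- the countP splits into w itself plus the other occurrences
  have hsplit : ∀ j : Nat, j ≤ w.toList.length →
      words.countP (fun u => decide (j ≤ lcp w.toList u.toList)) =
        1 + others.countP (fun u => decide (j ≤ lcp w.toList u.toList)) := by
    intro j hj
    have hperm : words.Perm (w :: others) := List.perm_cons_erase hw
    rw [hperm.countP_eq, List.countP_cons]
    have hdec : decide (j ≤ lcp w.toList w.toList) = true := by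
      simp only [decide_eq_true_eq, lcp_self]
      exact hj
    rw [hdec]
    simp
    omega
  -- the unique-prefix test holds exactly from depth t0 on
  have hpred : ∀ j : Nat, j ≤ w.toList.length →
      ((cnt.getD (PySem.List.slice w.toList none (some (j : Int))) 0 == 1) = true ↔ t0 ≤ j) := by
    intro j hj
    rw [PySem.List.slice_to w.toList (Int.natCast_nonneg j)]
    simp only [Int.toNat_natCast]
    rw [hcount j hj, hsplit j hj]
    have hz : ∀ c : Nat, ((((1 + c : Nat) : Nat) : Int) == 1) = true ↔ c = 0 := by
      intro c
      constructor
      · intro h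
        have := beq_iff_eq.mp h
        omega
      · intro h
        rw [h]
        rfl
    rw [hz]
    rw [List.countP_eq_zero]
    by_cases hemp : others = []
    · simp [hemp, ht0]
    · rw [ht0, if_neg hemp]
      constructor
      · intro hall
        obtain ⟨u0, hu0⟩ := List.exists_mem_of_ne_nil _ hemp
        have h0 := hall u0 hu0
        simp only [decide_eq_true_eq] at h0
        push Not at h0
        have hjpos : 0 < j := by omega
        rcases foldr_max_mem (others.map (fun u => lcp w.toList u.toList)) with hc | hc
        · rw [hM, maxl] at *
          omega
        · rw [List.mem_map] at hc
          obtain ⟨u, hu, huc⟩ := hc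
          have := hall u hu
          simp only [decide_eq_true_eq] at this
          push Not at this
          rw [hM, maxl]
          omega
      · intro hle u hu
        simp only [decide_eq_true_eq]
        push Not
        have : lcp w.toList u.toList ≤ M := by
          rw [hM, maxl]
          exact (foldr_max_le _ _).mp (le_refl _) _ (List.mem_map_of_mem hu)
        omega
  -- run the loop
  rw [strlen_cast]
  rw [show (0 : Int) = ((0 : Nat) : Int) from rfl]
  rw [findTyped_range cnt w.toList t0 hpred (w.toList.length + 1) 0 rfl]
  rw [val, ← hothers, ← hM]
  by_cases hemp : others = []
  · have ht0' : t0 = 0 := by rw [ht0, if_pos hemp]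
    rw [if_pos hemp, ht0']
    simp
  · have ht0' : t0 = M + 1 := by rw [ht0, if_neg hemp]
    rw [if_neg hemp, ht0']
    have hmx : max 0 (M + 1) = M + 1 := by omega
    rw [hmx]
    split_ifs with h
    · congr 1
      omega
    · congr 1
      omega

lemma solution_alt_eq_sum (words : List String) :
    solution_alt words = ((words.map (fun w => val w words)).sum) := by
  unfold solution_alt
  show words.foldl (fun answer w => answer +
      findTyped (words.foldl cntStep PySem.Dict.empty) w.toList
        (PySem.List.pyRange 0 (PySem.Str.len w + 1))) 0 = _
  rw [PySem.List.foldl_add]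
  rw [List.map_congr_left (fun w hw => findTyped_eq_val words w hw)]
  simp

-- ===== VERDICT (by name: the statement is the Claim_ definition above) =====
theorem solution_spec : Claim_equal_solution := by
  intro words _
  unfold Spec_solution
  rw [solution_eq_sum, solution_alt_eq_sum]
  have hperm : (PySem.List.sorted words (fun x => x)).Perm words :=
    PySem.List.sorted_perm words _ false
  calc ((PySem.List.sorted words (fun x => x)).map
          (fun w => val w (PySem.List.sorted words (fun x => x)))).sum
      = ((PySem.List.sorted words (fun x => x)).map (fun w => val w words)).sum := by
        apply congrArg List.sum
        exact List.map_congr_left (fun w _ => val_perm w _ _ hperm)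
    _ = ((words.map (fun w => val w words)).sum) := (hperm.map _).sum_eq
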